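-- pv_equiv track=rewrite | github.com/databill86/association_rule_mining | src/spark_code/stripe_counts.py | create_movie_dict
-- ===== SOURCE A (Python) =====
-- from collections import defaultdict
--
-- def create_movie_dict(sorted_movies):
--     movies_dict = defaultdict(lambda: defaultdict(int))
--     for i in range(0, len(sorted_movies)):
--         id_i = sorted_movies[i]
--         j_start = i + 1
--         for j in range(j_start, len(sorted_movies)):
--             id_j = sorted_movies[j]
--             movies_dict[id_i][id_j] += 1
--     return movies_dict
-- ===== SOURCE B (Python) =====
-- from collections import defaultdict
--
-- def create_movie_dict(sorted_movies):
--     # One forward pass: each element receives a pair-count from every distinct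
--     # earlier value at once (its prefix frequency), instead of A's scan of all
--     # later elements for every position.
--     movies_dict = defaultdict(lambda: defaultdict(int))
--     prefix = {}
--     for w in sorted_movies:
--         for v, c in prefix.items():
--             movies_dict[v][w] += c
--         prefix[w] = prefix.get(w, 0) + 1
--     return movies_dict
-- ===== Notes on version B (the rewrite author's own statement) =====
-- stated objective: alternative
-- what changed: Replaces A's all-later-pairs double scan (each element against its whole suffix) by a single forward pass that keeps a prefix frequency table and, for each element, adds its pair-counts from every distinct earlier value at once.
import Mathlib
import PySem

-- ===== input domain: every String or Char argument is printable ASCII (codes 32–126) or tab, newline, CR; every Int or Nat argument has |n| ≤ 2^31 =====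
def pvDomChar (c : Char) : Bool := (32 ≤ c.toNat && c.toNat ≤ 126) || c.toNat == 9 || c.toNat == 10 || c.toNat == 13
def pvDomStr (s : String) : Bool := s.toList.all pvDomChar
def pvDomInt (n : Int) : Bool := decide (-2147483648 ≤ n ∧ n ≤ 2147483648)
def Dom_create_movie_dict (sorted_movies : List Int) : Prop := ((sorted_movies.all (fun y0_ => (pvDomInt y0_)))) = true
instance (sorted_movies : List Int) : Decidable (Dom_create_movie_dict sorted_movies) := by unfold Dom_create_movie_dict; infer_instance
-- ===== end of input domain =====

-- B replaces A's all-later-pairs double scan with one forward pass over a prefix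
-- frequency table (objective: alternative algorithm); same return value, proved equal.

-- ===== PORT A =====
def create_movie_dict (sorted_movies : List Int) : List (Int × List (Int × Int)) :=
  let movies_dict : PySem.Dict Int (PySem.Dict Int Int) :=
    (PySem.List.pyRange 0 (sorted_movies.length : Int) 1).foldl (fun movies_dict i =>
      let id_i := PySem.List.pyGetD sorted_movies i 0
      (PySem.List.pyRange (i + 1) (sorted_movies.length : Int) 1).foldl (fun movies_dict j =>
        let id_j := PySem.List.pyGetD sorted_movies j 0
        movies_dict.insert id_i ((movies_dict.getD id_i PySem.Dict.empty).modify id_j 0 (· + 1)))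
        movies_dict)
      PySem.Dict.empty
  movies_dict.items.map (fun p => (p.1, p.2.items))

-- ===== PORT B =====
def create_movie_dict_alt (sorted_movies : List Int) : List (Int × List (Int × Int)) :=
  let st : PySem.Dict Int (PySem.Dict Int Int) × PySem.Dict Int Int :=
    sorted_movies.foldl (fun st w =>
      let movies_dict := st.2.items.foldl (fun d vc =>
        d.insert vc.1 ((d.getD vc.1 PySem.Dict.empty).modify w 0 (· + vc.2))) st.1
      (movies_dict, st.2.insert w (st.2.getD w 0 + 1)))
      (PySem.Dict.empty, PySem.Dict.empty)
  st.1.items.map (fun p => (p.1, p.2.items))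

-- ===== PRECONDITION & SPEC =====
def Spec_create_movie_dict (sorted_movies : List Int) (out : List (Int × List (Int × Int))) : Prop := out = create_movie_dict_alt sorted_movies
instance (sorted_movies : List Int) (out : List (Int × List (Int × Int))) : Decidable (Spec_create_movie_dict sorted_movies out) := by unfold Spec_create_movie_dict; infer_instance

-- ===== CLAIM (what is proved, stated in full; the proofs are below) =====
def Claim_equal_create_movie_dict : Prop := ∀ (sorted_movies : List Int), Dom_create_movie_dict sorted_movies → Spec_create_movie_dict sorted_movies (create_movie_dict sorted_movies)

-- ===== LEMMAS AND PROOFS =====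

def pvBump (d : PySem.Dict Int (PySem.Dict Int Int)) (v w c : Int) : PySem.Dict Int (PySem.Dict Int Int) :=
  d.insert v ((d.getD v PySem.Dict.empty).modify w 0 (· + c))
def pvRun (d : PySem.Dict Int (PySem.Dict Int Int)) (ops : List (Int × Int × Int)) :
    PySem.Dict Int (PySem.Dict Int Int) :=
  ops.foldl (fun d o => pvBump d o.1 o.2.1 o.2.2) d
def pvCnt (ops : List (Int × Int × Int)) (v w : Int) : Int :=
  ((ops.filter (fun o => o.1 == v && o.2.1 == w)).map (fun o => o.2.2)).sum
def pvInn (ops : List (Int × Int × Int)) (v : Int) : PySem.Dict Int Int :=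
  PySem.Dict.mk ((PySem.Set.ofList ((ops.filter (fun o => o.1 == v)).map (fun o => o.2.1))).map
    (fun w => (w, pvCnt ops v w)))
def pvNf (ops : List (Int × Int × Int)) : PySem.Dict Int (PySem.Dict Int Int) :=
  PySem.Dict.mk ((PySem.Set.ofList (ops.map (fun o => o.1))).map (fun v => (v, pvInn ops v)))

theorem pvContains_mapMk {ν : Type} (keys : List Int) (g : Int → ν) (v : Int) :
    (PySem.Dict.mk (keys.map (fun k => (k, g k)))).contains v = decide (v ∈ keys) := by
  induction keys with
  | nil => simp [PySem.Dict.contains]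
  | cons k ks ih =>
      simp only [PySem.Dict.contains] at ih ⊢
      simp only [List.map_cons, List.any_cons, ih, List.mem_cons]
      by_cases h : k = v
      · simp [h]
      · have h' : ¬ v = k := fun hh => h hh.symm
        simp [h, h', beq_iff_eq]
theorem pvGetD_mapMk {ν : Type} (keys : List Int) (g : Int → ν) (v : Int) (dflt : ν) :
    (PySem.Dict.mk (keys.map (fun k => (k, g k)))).getD v dflt =
      if v ∈ keys then g v else dflt := by
  induction keys with
  | nil => simp [PySem.Dict.getD, PySem.Dict.get?]
  | cons k ks ih =>
      simp only [List.map_cons]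
      rw [PySem.Dict.getD, PySem.Dict.get?_mk_cons]
      by_cases h : k = v
      · simp [h]
      · have h' : ¬ v = k := fun hh => h hh.symm
        simp only [beq_iff_eq, h, if_false]
        rw [← PySem.Dict.getD, ih]
        simp [List.mem_cons, h']
theorem pvInsert_mapMk_mem {ν : Type} (keys : List Int) (g : Int → ν) (v : Int) (x : ν)
    (h : v ∈ keys) :
    (PySem.Dict.mk (keys.map (fun k => (k, g k)))).insert v x =
      PySem.Dict.mk (keys.map (fun k => (k, if k = v then x else g k))) := by
  rw [PySem.Dict.insert, pvContains_mapMk]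
  simp only [h, decide_true, if_true]
  congr 1
  simp only [List.map_map]
  refine List.map_congr_left (fun k _ => ?_)
  by_cases hk : k = v <;> simp [hk]
theorem pvInsert_mapMk_not_mem {ν : Type} (keys : List Int) (g : Int → ν) (v : Int) (x : ν)
    (h : v ∉ keys) :
    (PySem.Dict.mk (keys.map (fun k => (k, g k)))).insert v x =
      PySem.Dict.mk (keys.map (fun k => (k, g k)) ++ [(v, x)]) := by
  rw [PySem.Dict.insert, pvContains_mapMk]
  simp [h]
theorem pvAdd_of_mem (s : PySem.Set Int) (x : Int) (h : x ∈ s) : PySem.Set.add s x = s := by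
  rw [PySem.Set.add]
  simp [PySem.Set.contains, h]

-- snoc facts
theorem pvOfList_snoc (xs : List Int) (a : Int) :
    PySem.Set.ofList (xs ++ [a]) = PySem.Set.add (PySem.Set.ofList xs) a := by
  simp [PySem.Set.ofList, List.foldl_append]

theorem pvFilter_snoc_ne (ops : List (Int × Int × Int)) (v w c v' : Int) (h : v' ≠ v) :
    ((ops ++ [(v, w, c)]).filter (fun o => o.1 == v')) = ops.filter (fun o => o.1 == v') := by
  simp [List.filter_append, beq_iff_eq, h, Ne.symm h]

theorem pvCnt_snoc_ne (ops : List (Int × Int × Int)) (v w c v' : Int) (h : v' ≠ v) (w' : Int) :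
    pvCnt (ops ++ [(v, w, c)]) v' w' = pvCnt ops v' w' := by
  simp [pvCnt, List.filter_append, beq_iff_eq, Ne.symm h]

theorem pvInn_snoc_ne (ops : List (Int × Int × Int)) (v w c v' : Int) (h : v' ≠ v) :
    pvInn (ops ++ [(v, w, c)]) v' = pvInn ops v' := by
  unfold pvInn
  rw [pvFilter_snoc_ne _ _ _ _ _ h]
  congr 1
  exact List.map_congr_left (fun w' _ => by rw [pvCnt_snoc_ne _ _ _ _ _ h])

theorem pvCnt_snoc_self (ops : List (Int × Int × Int)) (v w c : Int) :
    pvCnt (ops ++ [(v, w, c)]) v w = pvCnt ops v w + c := by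
  simp [pvCnt, List.filter_append]

theorem pvCnt_snoc_self_ne (ops : List (Int × Int × Int)) (v w c w' : Int) (h : w' ≠ w) :
    pvCnt (ops ++ [(v, w, c)]) v w' = pvCnt ops v w' := by
  simp [pvCnt, List.filter_append, Ne.symm h]

theorem pvFilter_nil_of_not_mem (ops : List (Int × Int × Int)) (v : Int)
    (h : v ∉ ops.map (fun o => o.1)) : ops.filter (fun o => o.1 == v) = [] := by
  rw [List.filter_eq_nil_iff]
  intro o ho
  simp only [beq_iff_eq]
  intro he
  exact h (List.mem_map.mpr ⟨o, ho, he⟩)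

theorem pvCnt_zero_of_not_innkey (ops : List (Int × Int × Int)) (v w : Int)
    (h : w ∉ (ops.filter (fun o => o.1 == v)).map (fun o => o.2.1)) : pvCnt ops v w = 0 := by
  unfold pvCnt
  have : ops.filter (fun o => o.1 == v && o.2.1 == w) = [] := by
    rw [List.filter_eq_nil_iff]
    intro o ho
    simp only [Bool.and_eq_true, beq_iff_eq, not_and]
    intro hv hw
    exact h (List.mem_map.mpr ⟨o, List.mem_filter.mpr ⟨ho, by simp [hv]⟩, hw⟩)
  simp [this]

theorem pvCnt_zero_of_not_key (ops : List (Int × Int × Int)) (v w : Int)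
    (h : v ∉ ops.map (fun o => o.1)) : pvCnt ops v w = 0 := by
  apply pvCnt_zero_of_not_innkey
  rw [pvFilter_nil_of_not_mem _ _ h]
  simp

theorem pvNf_snoc (ops : List (Int × Int × Int)) (v w c : Int) :
    pvBump (pvNf ops) v w c = pvNf (ops ++ [(v, w, c)]) := by
  have inn_ne : ∀ v', v' ≠ v →
      (fun v'' => (v'', pvInn (ops ++ [(v, w, c)]) v'')) v' = (fun v'' => (v'', pvInn ops v'')) v' := by
    intro v' hvv
    simp only
    rw [pvInn_snoc_ne _ _ _ _ _ hvv]
  unfold pvBump pvNf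
  rw [pvGetD_mapMk]
  rw [PySem.Dict.modify]
  by_cases hv : v ∈ PySem.Set.ofList (ops.map (fun o => o.1))
  · simp only [hv, if_true]
    have hgetw := pvGetD_mapMk ((PySem.Set.ofList ((ops.filter (fun o => o.1 == v)).map (fun o => o.2.1)))) (fun w' => pvCnt ops v w') w (0 : Int)
    by_cases hw : w ∈ PySem.Set.ofList ((ops.filter (fun o => o.1 == v)).map (fun o => o.2.1))
    · rw [show pvInn ops v = PySem.Dict.mk (((PySem.Set.ofList ((ops.filter (fun o => o.1 == v)).map (fun o => o.2.1)))).map (fun w' => (w', pvCnt ops v w'))) from rfl]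
      rw [pvGetD_mapMk, pvInsert_mapMk_mem _ _ _ _ hw, pvInsert_mapMk_mem _ _ _ _ hv]
      simp only [hw, if_true]
      simp only [List.map_append, List.map_map, List.map_cons, List.map_nil, pvOfList_snoc]
      rw [pvAdd_of_mem _ _ hv]
      refine congrArg PySem.Dict.mk (List.map_congr_left (fun v' hv' => ?_))
      by_cases hvv : v' = v
      · subst v'
        simp only [if_true]
        have hfil : ((ops ++ [(v, w, c)]).filter (fun o => o.1 == v)) = ops.filter (fun o => o.1 == v) ++ [(v,w,c)] := by
          simp [List.filter_append]
        rw [show pvInn (ops ++ [(v, w, c)]) v = PySem.Dict.mk (((PySem.Set.ofList (((ops ++ [(v, w, c)]).filter (fun o => o.1 == v)).map (fun o => o.2.1)))).map (fun w' => (w', pvCnt (ops ++ [(v, w, c)]) v w'))) from rfl]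
        rw [hfil]
        simp only [List.map_append, List.map_map, List.map_cons, List.map_nil, pvOfList_snoc]
        rw [pvAdd_of_mem _ _ hw]
        refine congrArg _ (congrArg PySem.Dict.mk (List.map_congr_left (fun w' hw' => ?_)))
        by_cases hww : w' = w
        · subst hww; simp [pvCnt_snoc_self]
        · simp [hww, pvCnt_snoc_self_ne _ _ _ _ _ hww]
      · simp only [hvv, if_false]
        exact (inn_ne v' hvv).symm
    · rw [show pvInn ops v = PySem.Dict.mk (((PySem.Set.ofList ((ops.filter (fun o => o.1 == v)).map (fun o => o.2.1)))).map (fun w' => (w', pvCnt ops v w'))) from rfl]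
      rw [pvGetD_mapMk, pvInsert_mapMk_not_mem _ _ _ _ hw, pvInsert_mapMk_mem _ _ _ _ hv]
      simp only [hw, if_false]
      simp only [List.map_append, List.map_map, List.map_cons, List.map_nil, pvOfList_snoc]
      rw [pvAdd_of_mem _ _ hv]
      refine congrArg PySem.Dict.mk (List.map_congr_left (fun v' hv' => ?_))
      by_cases hvv : v' = v
      · subst v'
        simp only [if_true]
        have hfil : ((ops ++ [(v, w, c)]).filter (fun o => o.1 == v)) = ops.filter (fun o => o.1 == v) ++ [(v,w,c)] := by
          simp [List.filter_append]
        rw [show pvInn (ops ++ [(v, w, c)]) v = PySem.Dict.mk (((PySem.Set.ofList (((ops ++ [(v, w, c)]).filter (fun o => o.1 == v)).map (fun o => o.2.1)))).map (fun w' => (w', pvCnt (ops ++ [(v, w, c)]) v w'))) from rfl]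
        rw [hfil]
        simp only [List.map_append, List.map_map, List.map_cons, List.map_nil, pvOfList_snoc]
        rw [PySem.Set.add]
        have hwc : (PySem.Set.ofList ((ops.filter (fun o => o.1 == v)).map (fun o => o.2.1))).contains w = false := by
          simp only [PySem.Set.contains]
          simpa using hw
        rw [hwc]
        simp only [Bool.false_eq_true, if_false, List.map_append, List.map_cons, List.map_nil]
        refine congrArg (Prod.mk v) ?_
        refine congrArg PySem.Dict.mk ?_
        refine congrArg₂ (· ++ ·) ?_ ?_
        · refine List.map_congr_left (fun w' hw'' => ?_)
          have hww : w' ≠ w := fun he => hw (he ▸ hw'')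
          rw [pvCnt_snoc_self_ne _ _ _ _ _ hww]
        · have h0 : pvCnt ops v w = 0 := pvCnt_zero_of_not_innkey _ _ _ (by simpa [PySem.Set.mem_ofList] using hw)
          simp [pvCnt_snoc_self, h0]
      · simp only [hvv, if_false]
        exact (inn_ne v' hvv).symm
  · simp only [hv, if_false]
    rw [pvInsert_mapMk_not_mem _ _ _ _ hv]
    simp only [List.map_append, List.map_map, List.map_cons, List.map_nil, pvOfList_snoc]
    rw [PySem.Set.add]
    have hvc : (PySem.Set.ofList (ops.map (fun o => o.1))).contains v = false := by
      simp only [PySem.Set.contains]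
      simpa using hv
    rw [hvc]
    simp only [Bool.false_eq_true, if_false, List.map_append, List.map_cons, List.map_nil]
    refine congrArg PySem.Dict.mk ?_
    refine congrArg₂ (· ++ ·) ?_ ?_
    · refine List.map_congr_left (fun v' hv'' => ?_)
      have hvv : v' ≠ v := fun he => hv (he ▸ hv'')
      exact (inn_ne v' hvv).symm
    · have hker : v ∉ ops.map (fun o => o.1) := by simpa [PySem.Set.mem_ofList] using hv
      refine congrArg (fun z => [(v, z)]) ?_
      have hfil : ((ops ++ [(v, w, c)]).filter (fun o => o.1 == v)) = [(v,w,c)] := by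
        simp [List.filter_append, pvFilter_nil_of_not_mem _ _ hker]
      rw [show pvInn (ops ++ [(v, w, c)]) v = PySem.Dict.mk (((PySem.Set.ofList (((ops ++ [(v, w, c)]).filter (fun o => o.1 == v)).map (fun o => o.2.1)))).map (fun w' => (w', pvCnt (ops ++ [(v, w, c)]) v w'))) from rfl]
      rw [hfil]
      have h0 : pvCnt ops v w = 0 := pvCnt_zero_of_not_key _ _ _ hker
      have hc : pvCnt (ops ++ [(v, w, c)]) v w = c := by rw [pvCnt_snoc_self, h0]; norm_num
      simp [PySem.Dict.insert, PySem.Dict.getD, PySem.Dict.get?, PySem.Dict.empty,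
        PySem.Dict.contains, PySem.Set.ofList, PySem.Set.add, PySem.Set.empty,
        PySem.Set.contains, hc]

theorem pvRun_nf (ops : List (Int × Int × Int)) : pvRun PySem.Dict.empty ops = pvNf ops := by
  induction ops using List.reverseRecOn with
  | nil => rfl
  | append_singleton ops o ih =>
      obtain ⟨v, w, c⟩ := o
      have : pvRun PySem.Dict.empty (ops ++ [(v,w,c)]) = pvBump (pvRun PySem.Dict.empty ops) v w c := by
        rw [pvRun, List.foldl_append]; rfl
      rw [this, ih, pvNf_snoc]

def pvOpsA : List Int → List (Int × Int × Int)
  | [] => []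
  | v :: r => r.map (fun w => (v, w, (1 : Int))) ++ pvOpsA r
def pvOpsB (p : PySem.Dict Int Int) : List Int → List (Int × Int × Int)
  | [] => []
  | w :: r => p.items.map (fun q => (q.1, w, q.2)) ++ pvOpsB (p.insert w (p.getD w 0 + 1)) r
def pvSI (v : Int) : List Int → List Int
  | [] => []
  | x :: r => if x = v then r else pvSI v r
def pvNp (v w : Int) : List Int → Int
  | [] => 0
  | x :: r => (if x = v then (r.count w : Int) else 0) + pvNp v w r
def pvNpc (v w : Int) (c : Int) : List Int → Int
  | [] => 0
  | x :: r => (if x = w then c else 0) + pvNpc v w (if x = v then c + 1 else c) r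

theorem pvUpdate_append (s : PySem.Set Int) (xs ys : List Int) :
    PySem.Set.update s (xs ++ ys) = PySem.Set.update (PySem.Set.update s xs) ys := by
  simp [PySem.Set.update, List.foldl_append]

theorem pvUpdate_absorb (s : PySem.Set Int) (xs : List Int) (h : ∀ x ∈ xs, x ∈ s) :
    PySem.Set.update s xs = s := by
  induction xs generalizing s with
  | nil => rfl
  | cons y ys ih =>
      simp only [PySem.Set.update, List.foldl_cons, pvAdd_of_mem s y (h y (by simp))]
      exact ih s (fun x hx => h x (by simp [hx]))

theorem pvMem_update (s : PySem.Set Int) (xs : List Int) (x : Int) :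
    x ∈ PySem.Set.update s xs ↔ x ∈ s ∨ x ∈ xs := by
  induction xs generalizing s with
  | nil => simp [PySem.Set.update]
  | cons y ys ih =>
      simp only [PySem.Set.update, List.foldl_cons] at ih ⊢
      rw [ih, PySem.Set.mem_add]
      simp [List.mem_cons]; tauto

theorem pvUpdate_replicate (s : PySem.Set Int) (x : Int) (n : Nat) (h : n ≠ 0) :
    PySem.Set.update s (List.replicate n x) = PySem.Set.add s x := by
  induction n generalizing s with
  | zero => omega
  | succ m ih =>
      rcases Nat.eq_zero_or_pos m with hm | hm
      · subst hm; rfl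
      · simp only [List.replicate_succ, PySem.Set.update, List.foldl_cons] at ih ⊢
        rw [ih (s.add x) (by omega), pvAdd_of_mem _ x (by rw [PySem.Set.mem_add]; right; rfl)]

theorem pvMapFstA (x : Int) (r : List Int) :
    (r.map (fun w => (x, w, (1:Int)))).map (fun o => o.1) = List.replicate r.length x := by
  induction r with
  | nil => rfl
  | cons y ys ih => simp_all [List.replicate_succ]

theorem pvC1A (l : List Int) : ∀ (s : PySem.Set Int),
    PySem.Set.update s ((pvOpsA l).map (fun o => o.1)) = PySem.Set.update s l.dropLast := by
  induction l with
  | nil => intro s; rfl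
  | cons x r ih =>
      intro s
      rw [pvOpsA]
      simp only [List.map_append, pvUpdate_append, pvMapFstA]
      rcases eq_or_ne r [] with hr | hrne
      · subst hr; rfl
      · rw [pvUpdate_replicate _ _ _ (by simpa using hrne), ih]
        rw [List.dropLast_cons_of_ne_nil hrne]
        rfl

theorem pvKeys_insert_counterlike (p : PySem.Dict Int Int) (w : Int) :
    (p.insert w (p.getD w 0 + 1)).keys = if w ∈ p.keys then p.keys else p.keys ++ [w] := by
  by_cases h : w ∈ p.keys
  · rw [PySem.Dict.keys_insert_of_contains]
    · simp [h]
    · exact (PySem.Dict.contains_iff_mem_keys p w).mpr h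
  · rw [PySem.Dict.keys_insert_of_not_contains]
    · simp [h]
    · rw [Bool.eq_false_iff]
      intro hc
      exact h ((PySem.Dict.contains_iff_mem_keys p w).mp hc)

theorem pvMapFstB (p : PySem.Dict Int Int) (x : Int) :
    (p.items.map (fun q => (q.1, x, q.2))).map (fun o => o.1) = p.keys := by
  simp [List.map_map, PySem.Dict.keys]

theorem pvC1B (l : List Int) : ∀ (p : PySem.Dict Int Int) (s : PySem.Set Int),
    PySem.Set.update s ((pvOpsB p l).map (fun o => o.1)) =
      if l = [] then s else PySem.Set.update (PySem.Set.update s p.keys) l.dropLast := by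
  induction l with
  | nil => intro p s; rfl
  | cons x r ih =>
      intro p s
      rw [pvOpsB]
      simp only [List.map_append, pvUpdate_append, pvMapFstB]
      rw [ih]
      have habs : PySem.Set.update (PySem.Set.update s p.keys) p.keys = PySem.Set.update s p.keys :=
        pvUpdate_absorb _ _ (fun y hy => (pvMem_update s p.keys y).mpr (Or.inr hy))
      rcases eq_or_ne r [] with hr | hrne
      · subst hr
        simp [List.dropLast, habs]
      · simp only [hrne, if_false, List.cons_ne_nil, reduceIte]
        rw [List.dropLast_cons_of_ne_nil hrne, pvKeys_insert_counterlike]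
        have hxmem : ∀ t : PySem.Set Int, PySem.Set.update (PySem.Set.update t p.keys) (x :: r.dropLast) = PySem.Set.update (PySem.Set.update (PySem.Set.update t p.keys) [x]) r.dropLast := by
          intro t
          rw [show (x :: r.dropLast) = [x] ++ r.dropLast from rfl, pvUpdate_append]
        by_cases hw : x ∈ p.keys
        · simp only [hw, if_true, habs]
          rw [hxmem]
          congr 1
          exact (pvAdd_of_mem _ _ ((pvMem_update s p.keys x).mpr (Or.inr hw))).symm
        · simp only [hw, if_false]
          rw [pvUpdate_append, habs, hxmem]

theorem pvSI_subset (v : Int) (l : List Int) : ∀ x ∈ pvSI v l, x ∈ l := by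
  induction l with
  | nil => simp [pvSI]
  | cons y r ih =>
      intro x hx
      rw [pvSI] at hx
      by_cases hy : y = v
      · simp only [hy, if_true] at hx
        exact List.mem_cons_of_mem _ hx
      · simp only [hy, if_false] at hx
        exact List.mem_cons_of_mem _ (ih x hx)

theorem pvBlockA (x v : Int) (r : List Int) :
    ((r.map (fun w => (x, w, (1:Int)))).filter (fun o => o.1 == v)).map (fun o => o.2.1) =
      if x = v then r else [] := by
  induction r with
  | nil => simp
  | cons y ys ih => by_cases h : x = v <;> simp_all

theorem pvC2A (l : List Int) (v : Int) : ∀ (s : PySem.Set Int),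
    PySem.Set.update s (((pvOpsA l).filter (fun o => o.1 == v)).map (fun o => o.2.1)) =
      PySem.Set.update s (pvSI v l) := by
  induction l with
  | nil => intro s; rfl
  | cons x r ih =>
      intro s
      rw [pvOpsA]
      simp only [List.filter_append, List.map_append, pvUpdate_append, pvBlockA]
      rw [pvSI]
      by_cases hx : x = v
      · simp only [hx, if_true]
        rw [ih]
        exact pvUpdate_absorb _ _ (fun y hy =>
          (pvMem_update s r y).mpr (Or.inr (pvSI_subset v r y hy)))
      · simp only [hx, if_false]
        exact ih s

theorem pvBlockB_nil (x v : Int) (it : List (Int × Int)) (h : v ∉ it.map Prod.fst) :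
    (it.map (fun q => (q.1, x, q.2))).filter (fun o => o.1 == v) = [] := by
  rw [List.filter_eq_nil_iff]
  intro o ho
  obtain ⟨q, hq, rfl⟩ := List.mem_map.mp ho
  simp only [beq_iff_eq]
  intro he
  exact h (List.mem_map.mpr ⟨q, hq, he⟩)

theorem pvBlockB (x v : Int) (it : List (Int × Int)) (h : (it.map Prod.fst).Nodup) :
    ((it.map (fun q => (q.1, x, q.2))).filter (fun o => o.1 == v)).map (fun o => o.2.1) =
      if v ∈ it.map Prod.fst then [x] else [] := by
  induction it with
  | nil => simp
  | cons q t ih =>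
      simp only [List.map_cons, List.nodup_cons] at h ⊢
      by_cases hq : q.1 = v
      · subst hq
        rw [List.filter_cons_of_pos (by simp)]
        rw [pvBlockB_nil x q.1 t h.1]
        rw [if_pos (show q.1 ∈ q.1 :: List.map Prod.fst t from List.mem_cons.mpr (Or.inl rfl))]
        rfl
      · rw [List.filter_cons_of_neg (by simp [hq])]
        rw [ih h.2]
        have hne : ¬ v = q.1 := fun he => hq he.symm
        by_cases hm : v ∈ List.map Prod.fst t
        · rw [if_pos hm, if_pos (List.mem_cons.mpr (Or.inr hm))]
        · rw [if_neg hm, if_neg (by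
            intro hc
            rcases List.mem_cons.mp hc with he | hm2
            · exact hne he
            · exact hm hm2)]

theorem pvNodupKeys_insert_counterlike (p : PySem.Dict Int Int) (w : Int) (h : p.keys.Nodup) :
    (p.insert w (p.getD w 0 + 1)).keys.Nodup := by
  rw [pvKeys_insert_counterlike]
  by_cases hw : w ∈ p.keys
  · simpa [hw] using h
  · simp only [hw, if_false]
    simp only [List.nodup_append]
    refine ⟨h, by simp, ?_⟩
    intro a ha b hb
    rw [List.mem_singleton] at hb
    subst hb
    intro he
    rw [he] at ha
    exact hw ha

theorem pvC2B (l : List Int) (v : Int) : ∀ (p : PySem.Dict Int Int) (s : PySem.Set Int),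
    p.keys.Nodup →
    PySem.Set.update s (((pvOpsB p l).filter (fun o => o.1 == v)).map (fun o => o.2.1)) =
      if v ∈ p.keys then PySem.Set.update s l else PySem.Set.update s (pvSI v l) := by
  induction l with
  | nil =>
      intro p s h
      by_cases hv : v ∈ p.keys <;> simp [pvOpsB, pvSI, hv, PySem.Set.update]
  | cons x r ih =>
      intro p s h
      rw [pvOpsB]
      simp only [List.filter_append, List.map_append, pvUpdate_append]
      have hblock := pvBlockB x v p.items (by simpa [PySem.Dict.keys] using h)
      rw [show (p.items.map Prod.fst) = p.keys from rfl] at hblock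
      rw [hblock]
      have hnd' := pvNodupKeys_insert_counterlike p x h
      rw [ih _ _ hnd', pvKeys_insert_counterlike]
      rw [pvSI]
      by_cases hv : v ∈ p.keys
      · have hv' : v ∈ (if x ∈ p.keys then p.keys else p.keys ++ [x]) := by
          by_cases hx : x ∈ p.keys <;> simp [hx, hv]
        simp only [hv, hv', if_true]
        rfl
      · simp only [hv, if_false]
        by_cases hx : x = v
        · subst hx
          have : x ∈ (if x ∈ p.keys then p.keys else p.keys ++ [x]) := by simp [hv]
          simp [this, hv]
        · have hvx : ¬ v = x := fun he => hx he.symm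
          have hne : ¬ v ∈ (if x ∈ p.keys then p.keys else p.keys ++ [x]) := by
            by_cases hxk : x ∈ p.keys
            · simpa [hxk] using hv
            · simp only [hxk, if_false, List.mem_append, List.mem_singleton]
              rintro (hm | hm)
              · exact hv hm
              · exact hvx hm
          simp [hne, hx]

theorem pvCnt_append (xs ys : List (Int × Int × Int)) (v w : Int) :
    pvCnt (xs ++ ys) v w = pvCnt xs v w + pvCnt ys v w := by
  simp [pvCnt, List.filter_append]

theorem pvCntBlockA (x v w : Int) (r : List Int) :
    pvCnt (r.map (fun w' => (x, w', (1:Int)))) v w =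
      if x = v then (r.count w : Int) else 0 := by
  induction r with
  | nil => simp [pvCnt]
  | cons y ys ih =>
      simp only [List.map_cons, pvCnt, List.filter_cons] at ih ⊢
      by_cases hx : x = v
      · subst hx
        by_cases hy : y = w
        · subst hy
          simp_all [List.count_cons]
          push_cast
          ring
        · simp_all [List.count_cons, hy]
      · simp_all [hx]

theorem pvC3A (l : List Int) (v w : Int) : pvCnt (pvOpsA l) v w = pvNp v w l := by
  induction l with
  | nil => simp [pvCnt, pvOpsA, pvNp]
  | cons x r ih =>
      rw [pvOpsA, pvCnt_append, pvCntBlockA, ih, pvNp]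

theorem pvCntBlockB_items (x v w : Int) (it : List (Int × Int)) (h : (it.map Prod.fst).Nodup) :
    pvCnt (it.map (fun q => (q.1, x, q.2))) v w =
      if x = w then ((PySem.Dict.mk it).getD v 0) else 0 := by
  induction it with
  | nil => simp [pvCnt, PySem.Dict.getD, PySem.Dict.get?]
  | cons q t ih =>
      simp only [List.map_cons, List.nodup_cons] at h
      rw [PySem.Dict.getD, PySem.Dict.get?_mk_cons]
      simp only [List.map_cons, pvCnt, List.filter_cons]
      by_cases hq : q.1 = v
      · subst hq
        have htail : (t.map (fun q' => (q'.1, x, q'.2))).filter (fun o => o.1 == q.1 && o.2.1 == w) = [] := by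
          rw [List.filter_eq_nil_iff]
          intro o ho
          obtain ⟨q', hq', rfl⟩ := List.mem_map.mp ho
          simp only [Bool.and_eq_true, beq_iff_eq, not_and]
          intro hv' _
          exact h.1 (List.mem_map.mpr ⟨q', hq', hv'⟩)
        by_cases hx : x = w
        · subst hx
          rw [if_pos (by simp), htail]
          simp
        · have hcond : ¬ (q.1 == q.1 && x == w) = true := by simp [hx]
          rw [if_neg hcond, htail, if_neg hx]
          simp [pvCnt]
      · have hcond : ¬ (q.1 == v && x == w) = true := by simp [hq]
        rw [if_neg hcond]
        rw [pvCnt] at ih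
        rw [ih h.2]
        have hb : ¬ (q.1 == v) = true := by simp [hq]
        simp only [hb, Bool.false_eq_true, if_false]
        simp [PySem.Dict.getD]

theorem pvCntBlockB (x v w : Int) (p : PySem.Dict Int Int) (h : p.keys.Nodup) :
    pvCnt (p.items.map (fun q => (q.1, x, q.2))) v w =
      if x = w then p.getD v 0 else 0 := by
  have := pvCntBlockB_items x v w p.items (by simpa [PySem.Dict.keys] using h)
  simpa using this

theorem pvC3B (l : List Int) (v w : Int) : ∀ (p : PySem.Dict Int Int), p.keys.Nodup →
    pvCnt (pvOpsB p l) v w = pvNpc v w (p.getD v 0) l := by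
  induction l with
  | nil => intro p h; simp [pvCnt, pvOpsB, pvNpc]
  | cons x r ih =>
      intro p h
      rw [pvOpsB, pvCnt_append, pvCntBlockB _ _ _ _ h, pvNpc]
      rw [ih _ (pvNodupKeys_insert_counterlike p x h)]
      congr 1
      congr 1
      rw [PySem.Dict.getD_insert]
      by_cases hvx : v = x
      · subst hvx; simp
      · simp only [hvx, if_false]
        rw [if_neg (fun he => hvx he.symm)]

theorem pvNpc_np (l : List Int) (v w : Int) : ∀ (c : Int),
    pvNpc v w c l = pvNp v w l + c * (l.count w : Int) := by
  induction l with
  | nil => intro c; simp [pvNpc, pvNp]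
  | cons x r ih =>
      intro c
      rw [pvNpc, pvNp, ih]
      by_cases hx : x = v <;> by_cases hw : x = w <;> by_cases hvw : v = w <;>
        simp only [hx, hw, hvw, List.count_cons, if_true, if_false, eq_comm] <;>
        push_cast <;> simp [hx, hw, hvw] <;> ring

theorem pvCnt_eq (l : List Int) (v w : Int) :
    pvCnt (pvOpsA l) v w = pvCnt (pvOpsB PySem.Dict.empty l) v w := by
  rw [pvC3A, pvC3B _ _ _ _ PySem.Dict.nodup_keys_empty, PySem.Dict.getD_empty, pvNpc_np]
  ring

theorem pvNf_eq (l : List Int) : pvNf (pvOpsA l) = pvNf (pvOpsB PySem.Dict.empty l) := by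
  have hempty : ∀ xs : List Int, PySem.Set.ofList xs = PySem.Set.update PySem.Set.empty xs :=
    fun xs => rfl
  have hkeys : PySem.Set.ofList ((pvOpsA l).map (fun o => o.1)) =
      PySem.Set.ofList ((pvOpsB PySem.Dict.empty l).map (fun o => o.1)) := by
    rw [hempty, hempty, pvC1A, pvC1B]
    rcases eq_or_ne l [] with rfl | h
    · rfl
    · simp only [h, if_false]
      rw [show (PySem.Dict.empty : PySem.Dict Int Int).keys = [] from rfl]
      rfl
  have hinn : ∀ v, pvInn (pvOpsA l) v = pvInn (pvOpsB PySem.Dict.empty l) v := by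
    intro v
    have hk2 : PySem.Set.ofList (((pvOpsA l).filter (fun o => o.1 == v)).map (fun o => o.2.1)) =
        PySem.Set.ofList (((pvOpsB PySem.Dict.empty l).filter (fun o => o.1 == v)).map (fun o => o.2.1)) := by
      rw [hempty, hempty, pvC2A, pvC2B _ _ _ _ PySem.Dict.nodup_keys_empty]
      have hv : ¬ v ∈ (PySem.Dict.empty : PySem.Dict Int Int).keys := by
        rw [show (PySem.Dict.empty : PySem.Dict Int Int).keys = [] from rfl]
        simp
      simp [hv]
    unfold pvInn
    rw [← hk2]
    exact congrArg PySem.Dict.mk (List.map_congr_left (fun w _ => by rw [pvCnt_eq]))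
  unfold pvNf
  rw [← hkeys]
  exact congrArg PySem.Dict.mk (List.map_congr_left (fun v _ => by rw [hinn v]))

theorem pvRun_append (d : PySem.Dict Int (PySem.Dict Int Int)) (xs ys : List (Int × Int × Int)) :
    pvRun d (xs ++ ys) = pvRun (pvRun d xs) ys := by
  simp [pvRun, List.foldl_append]

theorem pvPyRange_nil (a b : Int) (h : b ≤ a) : PySem.List.pyRange a b 1 = [] := by
  simp [PySem.List.pyRange]; intro h2; omega


theorem pvPortA_inner (l : List Int) (v : Int) : ∀ (k : Nat) (d : PySem.Dict Int (PySem.Dict Int Int)),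
    (PySem.List.pyRange (k : Int) (l.length : Int) 1).foldl
      (fun d j => d.insert v ((d.getD v PySem.Dict.empty).modify (PySem.List.pyGetD l j 0) 0 (· + 1))) d =
      pvRun d ((l.drop k).map (fun w => (v, w, (1 : Int)))) := by
  intro k
  induction hn : l.length - k generalizing k with
  | zero =>
      intro d
      rw [pvPyRange_nil _ _ (by exact_mod_cast Nat.le_of_sub_eq_zero hn), List.drop_eq_nil_of_le (by omega)]
      rfl
  | succ m ih =>
      intro d
      have hk : k < l.length := by omega
      rw [PySem.List.pyRange_one_cons (by exact_mod_cast hk)]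
      have h1 : ((k : Int) + 1) = ((k + 1 : Nat) : Int) := by push_cast; ring
      rw [List.foldl_cons, h1, ih (k + 1) (by omega)]
      rw [List.drop_eq_getElem_cons hk]
      simp only [List.map_cons, PySem.List.pyGetD_natCast]
      simp only [List.getD_eq_getElem?_getD, List.getElem?_eq_getElem hk, Option.getD_some]
      rfl


theorem pvPortA_outer (l : List Int) : ∀ (k : Nat) (d : PySem.Dict Int (PySem.Dict Int Int)),
    (PySem.List.pyRange (k : Int) (l.length : Int) 1).foldl
      (fun d i =>
        (PySem.List.pyRange (i + 1) (l.length : Int) 1).foldl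
          (fun d j => d.insert (PySem.List.pyGetD l i 0)
            ((d.getD (PySem.List.pyGetD l i 0) PySem.Dict.empty).modify (PySem.List.pyGetD l j 0) 0 (· + 1))) d) d =
      pvRun d (pvOpsA (l.drop k)) := by
  intro k
  induction hn : l.length - k generalizing k with
  | zero =>
      intro d
      rw [pvPyRange_nil _ _ (by exact_mod_cast Nat.le_of_sub_eq_zero hn), List.drop_eq_nil_of_le (by omega)]
      rfl
  | succ m ih =>
      intro d
      have hk : k < l.length := by omega
      rw [PySem.List.pyRange_one_cons (by exact_mod_cast hk), List.foldl_cons]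
      have h1 : ((k : Int) + 1) = ((k + 1 : Nat) : Int) := by push_cast; ring
      rw [h1, pvPortA_inner, ih (k + 1) (by omega)]
      rw [List.drop_eq_getElem_cons hk]
      simp only [PySem.List.pyGetD_natCast, List.getD_eq_getElem?_getD, List.getElem?_eq_getElem hk, Option.getD_some]
      rw [pvOpsA, pvRun_append]


theorem pvPortA (l : List Int) :
    create_movie_dict l = (pvRun PySem.Dict.empty (pvOpsA l)).items.map (fun p => (p.1, p.2.items)) := by
  have key := pvPortA_outer l 0 PySem.Dict.empty
  simp only [Nat.cast_zero, List.drop_zero] at key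
  simp only [create_movie_dict]
  rw [key]


theorem pvPortB_loop (l : List Int) : ∀ (d : PySem.Dict Int (PySem.Dict Int Int)) (p : PySem.Dict Int Int),
    (l.foldl (fun st w =>
      ((st.2.items.foldl (fun d vc =>
        d.insert vc.1 ((d.getD vc.1 PySem.Dict.empty).modify w 0 (· + vc.2))) st.1),
       st.2.insert w (st.2.getD w 0 + 1))) (d, p)).1 = pvRun d (pvOpsB p l) := by
  induction l with
  | nil => intro d p; rfl
  | cons w r ih =>
      intro d p
      rw [List.foldl_cons, ih, pvOpsB, pvRun_append]
      congr 1
      rw [pvRun, List.foldl_map]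
      rfl


theorem pvPortB (l : List Int) :
    create_movie_dict_alt l =
      (pvRun PySem.Dict.empty (pvOpsB PySem.Dict.empty l)).items.map (fun p => (p.1, p.2.items)) := by
  simp only [create_movie_dict_alt]
  rw [pvPortB_loop]

-- ===== VERDICT (by name: the statement is the Claim_ definition above) =====
theorem create_movie_dict_spec : Claim_equal_create_movie_dict := by
  intro l _
  unfold Spec_create_movie_dict
  rw [pvPortA, pvPortB, pvRun_nf, pvRun_nf, pvNf_eq]
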